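-- pv_equiv track=rewrite | github.com/tatiaris/tatiame-old | coding_problems/project_euler/19.py | is_january
-- ===== SOURCE A (Python) =====
-- def get_total_days(start, end):
--     total_days = 0
--     for i in range(start, end+1):
--         if i%4 == 0:
--             if i%100 == 0:
--                 if i%400 == 0:
--                     total_days += 366
--                 else:
--                     total_days += 365
--             else:
--                 total_days += 366
--         else:
--             total_days += 365
--     return total_days
--
-- def is_january(n):
--     if n < 32:
--         return True
--     j = 0
--     for i in range(1901, 2000):
--         if 0 < n - j < 32:
--             return True
--         j += get_total_days(i, i)
--     return False
-- ===== SOURCE B (Python) =====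
-- def is_january(n):
--     if n < 32:
--         return True
--     for Y in range(1901, 2000):
--         start = 1 + 365 * (Y - 1901) + (Y - 1) // 4 - 475
--         if start <= n <= start + 30:
--             return True
--     return False
-- ===== Notes on version B (the rewrite author's own statement) =====
-- stated objective: simpler
-- what changed: B drops the running day accumulator and the iterative per-year leap-counting helper, computing each year's January start day directly with a closed-form leap-year offset formula and testing an inclusive window.
import Mathlib
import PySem

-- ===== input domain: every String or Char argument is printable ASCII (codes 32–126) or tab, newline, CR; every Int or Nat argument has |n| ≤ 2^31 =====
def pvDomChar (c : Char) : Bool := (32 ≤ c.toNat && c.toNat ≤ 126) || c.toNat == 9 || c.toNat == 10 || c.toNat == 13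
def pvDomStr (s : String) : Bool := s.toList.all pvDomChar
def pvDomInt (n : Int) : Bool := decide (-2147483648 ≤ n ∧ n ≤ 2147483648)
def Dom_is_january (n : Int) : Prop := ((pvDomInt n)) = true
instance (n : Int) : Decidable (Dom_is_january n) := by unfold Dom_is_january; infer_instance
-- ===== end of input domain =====

-- B replaces A's per-year day accumulator (with its iterative leap counter) by a closed-form
-- offset for each year's January window; objective: simpler (no measured speedup claimed).

-- ===== PORT A =====
def get_total_days (start e : Int) : Int :=
  (PySem.List.pyRange start (e + 1) 1).foldl (fun total_days i =>
    if PySem.Int.mod i 4 = 0 then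
      if PySem.Int.mod i 100 = 0 then
        if PySem.Int.mod i 400 = 0 then total_days + 366 else total_days + 365
      else total_days + 366
    else total_days + 365) 0

def isJanLoopA (n : Int) : List Int → Int → Bool
  | [], _ => false
  | i :: rest, j =>
    if 0 < n - j ∧ n - j < 32 then true
    else isJanLoopA n rest (j + get_total_days i i)

def is_january (n : Int) : Bool :=
  if n < 32 then true
  else isJanLoopA n (PySem.List.pyRange 1901 2000 1) 0

-- ===== PORT B =====
def isJanLoopB (n : Int) : List Int → Bool
  | [] => false
  | y :: rest =>
    let start := 1 + 365 * (y - 1901) + PySem.Int.floordiv (y - 1) 4 - 475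
    if start ≤ n ∧ n ≤ start + 30 then true
    else isJanLoopB n rest

def is_january_alt (n : Int) : Bool :=
  if n < 32 then true
  else isJanLoopB n (PySem.List.pyRange 1901 2000 1)

-- ===== PRECONDITION & SPEC =====
def Spec_is_january (n : Int) (out : Bool) : Prop := out = is_january_alt n
instance (n : Int) (out : Bool) : Decidable (Spec_is_january n out) := by unfold Spec_is_january; infer_instance

-- ===== CLAIM (what is proved, stated in full; the proofs are below) =====
def Claim_equal_is_january : Prop := ∀ (n : Int), Dom_is_january n → Spec_is_january n (is_january n)

-- ===== LEMMAS AND PROOFS =====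

-- closed-form day offset of year y's January window start (minus one)
def janOfs (y : Int) : Int := 365 * (y - 1901) + PySem.Int.floordiv (y - 1) 4 - 475

lemma gtd_single (y : Int) (h1 : 1901 ≤ y) (h2 : y ≤ 1999) :
    get_total_days y y = janOfs (y + 1) - janOfs y := by
  have hr : PySem.List.pyRange y (y + 1) 1 = [y] := by
    rw [PySem.List.pyRange_one_cons (by omega), PySem.List.pyRange_one_eq_nil (by omega)]
  unfold get_total_days janOfs
  rw [hr]
  simp only [List.foldl]
  rw [PySem.Int.floordiv_eq_ediv_of_pos (a := y + 1 - 1) (by omega),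
      PySem.Int.floordiv_eq_ediv_of_pos (a := y - 1) (by omega)]
  by_cases h4 : PySem.Int.mod y 4 = 0
  · have hd4 : (4 : Int) ∣ y := (PySem.Int.mod_eq_zero_iff_dvd y 4).mp h4
    have h100 : ¬ PySem.Int.mod y 100 = 0 := by
      rw [PySem.Int.mod_eq_zero_iff_dvd]; omega
    rw [if_pos h4, if_neg h100]; omega
  · have hd4 : ¬ (4 : Int) ∣ y := fun h => h4 ((PySem.Int.mod_eq_zero_iff_dvd y 4).mpr h)
    rw [if_neg h4]; omega

lemma loop_eq (n : Int) (k : Nat) : ∀ a : Int, 1901 ≤ a → 2000 - a ≤ (k : Int) →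
    isJanLoopA n (PySem.List.pyRange a 2000 1) (janOfs a) =
      isJanLoopB n (PySem.List.pyRange a 2000 1) := by
  induction k with
  | zero =>
    intro a _ hk
    rw [PySem.List.pyRange_one_eq_nil (by omega)]
    rfl
  | succ k ih =>
    intro a h1 hk
    by_cases ha : a < 2000
    · rw [PySem.List.pyRange_one_cons ha]
      simp only [isJanLoopA, isJanLoopB]
      have hcond : (0 < n - janOfs a ∧ n - janOfs a < 32) ↔
          (1 + 365 * (a - 1901) + PySem.Int.floordiv (a - 1) 4 - 475 ≤ n ∧
            n ≤ 1 + 365 * (a - 1901) + PySem.Int.floordiv (a - 1) 4 - 475 + 30) := by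
        unfold janOfs; omega
      rw [if_congr hcond rfl rfl]
      by_cases hc : 1 + 365 * (a - 1901) + PySem.Int.floordiv (a - 1) 4 - 475 ≤ n ∧
          n ≤ 1 + 365 * (a - 1901) + PySem.Int.floordiv (a - 1) 4 - 475 + 30
      · rw [if_pos hc, if_pos hc]
      · rw [if_neg hc, if_neg hc]
        have hj : janOfs a + get_total_days a a = janOfs (a + 1) := by
          rw [gtd_single a h1 (by omega)]; ring
        rw [hj]
        exact ih (a + 1) (by omega) (by omega)
    · rw [PySem.List.pyRange_one_eq_nil (by omega)]
      rfl

-- ===== VERDICT (by name: the statement is the Claim_ definition above) =====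
theorem is_january_spec : Claim_equal_is_january := by
  intro n _
  unfold Spec_is_january is_january is_january_alt
  by_cases h : n < 32
  · rw [if_pos h, if_pos h]
  · rw [if_neg h, if_neg h]
    have h0 : (0 : Int) = janOfs 1901 := by decide
    rw [h0]
    exact loop_eq n 99 1901 (by omega) (by omega)
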